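-- pv_equiv track=rewrite | github.com/simon-dreyer/Shortest_path_sampling | code_python/comparaison_distance_longueur_moyenne.py | Distance_et_pcc_depuis_source
-- ===== SOURCE A (Python) =====
-- def Distance_et_pcc_depuis_source(dist,table):
--     """ Renvoie un dictionnaire où dict[l] = liste des (sommet à distance l,nombre de pcc (source)-->(arrivee) ) """
--     dico = {}
--     for noeud,distance in dist.items():
--         dico.setdefault(distance, []).append((noeud,table[noeud]))
--
--     # On veut avoir des sommes partielles en 2ème coordonnée.
--     for l in dico.keys():
--         for i in range(1,len(dico[l])):
--             arrivee,nombre_pcc_source_arrivee = dico[l][i]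
--             dico[l][i] = (arrivee, nombre_pcc_source_arrivee + dico[l][i-1][1])
--
--     return dico
-- ===== SOURCE B (Python) =====
-- def Distance_et_pcc_depuis_source(dist, table):
--     """ Renvoie un dictionnaire où dict[l] = liste des (sommet à distance l,
--     nombre de pcc cumulé (source)-->(arrivee) ), en une seule passe. """
--     dico = {}
--     running = {}
--     for noeud, distance in dist.items():
--         total = running.get(distance, 0) + table[noeud]
--         running[distance] = total
--         dico.setdefault(distance, []).append((noeud, total))
--     return dico
-- ===== Notes on version B (the rewrite author's own statement) =====
-- stated objective: simpler
-- what changed: one pass over dist.items() with a per-distance running-total dict replaces A's two-phase group-then-prefix-sum with its nested index loop that rewrites tuples in place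
import Mathlib
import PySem

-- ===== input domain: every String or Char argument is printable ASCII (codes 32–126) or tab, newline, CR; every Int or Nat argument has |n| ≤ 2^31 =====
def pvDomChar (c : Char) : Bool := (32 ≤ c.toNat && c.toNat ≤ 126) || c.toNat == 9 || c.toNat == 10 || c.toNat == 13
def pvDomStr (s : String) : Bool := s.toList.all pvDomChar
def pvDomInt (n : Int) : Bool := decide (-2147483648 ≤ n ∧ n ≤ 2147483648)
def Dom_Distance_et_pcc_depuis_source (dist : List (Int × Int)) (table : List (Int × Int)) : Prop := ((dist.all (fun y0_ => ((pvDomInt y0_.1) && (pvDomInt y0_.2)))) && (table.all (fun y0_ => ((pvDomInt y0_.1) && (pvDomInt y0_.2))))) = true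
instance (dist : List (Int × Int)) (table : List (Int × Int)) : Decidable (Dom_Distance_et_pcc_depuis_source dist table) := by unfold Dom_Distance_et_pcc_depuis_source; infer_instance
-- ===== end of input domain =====

-- B replaces A's two-phase "group, then prefix-sum each group by index" with ONE pass
-- keeping a per-distance running total (objective: simpler; same O(n)).

-- ===== PORT A =====
-- shared lookup `table[noeud]` (the dict parameter); total form, Pre_ excludes the KeyError
def pvTable (table : List (Int × Int)) (k : Int) : Int :=
  (PySem.Dict.mk table).getD k 0

-- the inner `for i in range(1, len(dico[l])): dico[l][i] = (arrivee, n + dico[l][i-1][1])`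
def pvInner (g : List (Int × Int)) : List (Int × Int) :=
  (PySem.List.pyRange 1 (PySem.List.len g) 1).foldl
    (fun h i =>
      let q := PySem.List.pyGetD h i (0, 0)
      PySem.List.pySetD h i (q.1, q.2 + (PySem.List.pyGetD h (i - 1) (0, 0)).2)) g

def Distance_et_pcc_depuis_source (dist : List (Int × Int)) (table : List (Int × Int)) : List (Int × List (Int × Int)) :=
  -- phase 1: dico.setdefault(distance, []).append((noeud, table[noeud]))
  let dico := dist.foldl
    (fun d p => d.modify p.2 [] (fun l => l ++ [(p.1, pvTable table p.1)]))
    PySem.Dict.empty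
  -- phase 2: prefix sums in the second coordinate, rewritten index by index
  let dico2 := dico.keys.foldl (fun d l => d.insert l (pvInner (d.getD l []))) dico
  dico2.items

-- ===== PORT B =====
def Distance_et_pcc_depuis_source_alt (dist : List (Int × Int)) (table : List (Int × Int)) : List (Int × List (Int × Int)) :=
  -- one pass: running[distance] accumulates, dico gets the cumulative value at once
  (dist.foldl
    (fun st p =>
      let total := st.2.getD p.2 0 + pvTable table p.1
      (st.1.modify p.2 [] (fun l => l ++ [(p.1, total)]), st.2.insert p.2 total))
    (PySem.Dict.empty, PySem.Dict.empty)).1.items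

-- ===== PRECONDITION & SPEC =====
-- Pre_ excludes exactly the inputs where Python A raises KeyError: a node of dist absent from table.
def Pre_Distance_et_pcc_depuis_source (dist : List (Int × Int)) (table : List (Int × Int)) : Prop :=
  ∀ p ∈ dist, p.1 ∈ table.map Prod.fst
instance (dist : List (Int × Int)) (table : List (Int × Int)) : Decidable (Pre_Distance_et_pcc_depuis_source dist table) := by unfold Pre_Distance_et_pcc_depuis_source; infer_instance

def pvWitness_Distance_et_pcc_depuis_source : (List (Int × Int)) × (List (Int × Int)) :=
  ([(1, 0), (2, 1), (3, 1), (4, 2)], [(1, 1), (2, 2), (3, 1), (4, 3)])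

def Spec_Distance_et_pcc_depuis_source (dist : List (Int × Int)) (table : List (Int × Int)) (out : List (Int × List (Int × Int))) : Prop := out = Distance_et_pcc_depuis_source_alt dist table
instance (dist : List (Int × Int)) (table : List (Int × Int)) (out : List (Int × List (Int × Int))) : Decidable (Spec_Distance_et_pcc_depuis_source dist table out) := by unfold Spec_Distance_et_pcc_depuis_source; infer_instance

-- ===== CLAIM (what is proved, stated in full; the proofs are below) =====
def Claim_equal_Distance_et_pcc_depuis_source : Prop := ∀ (dist : List (Int × Int)) (table : List (Int × Int)), Dom_Distance_et_pcc_depuis_source dist table → Pre_Distance_et_pcc_depuis_source dist table → Spec_Distance_et_pcc_depuis_source dist table (Distance_et_pcc_depuis_source dist table)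

-- ===== LEMMAS AND PROOFS =====

-- cumulative second coordinates, the common value both programs build per distance class
def pvCumsum (acc : Int) : List (Int × Int) → List (Int × Int)
  | [] => []
  | p :: t => (p.1, acc + p.2) :: pvCumsum (acc + p.2) t

theorem pvCumsum_length (acc : Int) (xs : List (Int × Int)) : (pvCumsum acc xs).length = xs.length := by
  induction xs generalizing acc with
  | nil => rfl
  | cons p t ih => simp [pvCumsum, ih]

theorem pvCumsum_append_singleton (acc : Int) (xs : List (Int × Int)) (x : Int × Int) :
    pvCumsum acc (xs ++ [x]) = pvCumsum acc xs ++ [(x.1, acc + (xs.map (·.2)).sum + x.2)] := by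
  induction xs generalizing acc with
  | nil => simp [pvCumsum]
  | cons p t ih => simp [pvCumsum, ih, add_assoc]

-- the index loop of A's phase 2 computes exactly the cumulative sums
theorem pvInner_take (g : List (Int × Int)) (k : Nat) (hk1 : 1 ≤ k) (hk : k ≤ g.length) :
    (PySem.List.pyRange 1 (k : Int) 1).foldl
      (fun h i =>
        let q := PySem.List.pyGetD h i (0, 0)
        PySem.List.pySetD h i (q.1, q.2 + (PySem.List.pyGetD h (i - 1) (0, 0)).2)) g
      = pvCumsum 0 (g.take k) ++ g.drop k := by
  revert hk
  induction k, hk1 using Nat.le_induction with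
  | base =>
    intro hk
    rw [show ((1 : Nat) : Int) = 1 by norm_num, PySem.List.pyRange_one_eq_nil le_rfl]
    match g, hk with
    | p :: t, _ => simp [pvCumsum]
  | succ k hk1 ih =>
    intro hk
    have hkle : k ≤ g.length := by omega
    have hklt : k < g.length := by omega
    have hklt1 : k - 1 < g.length := by omega
    have hcast : ((k + 1 : Nat) : Int) = (k : Int) + 1 := by omega
    rw [hcast, PySem.List.pyRange_one_succ_right (by exact_mod_cast hk1), List.foldl_append,
      ih hkle, List.foldl_cons, List.foldl_nil]
    have hprelen : (pvCumsum 0 (g.take k)).length = k := by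
      rw [pvCumsum_length, List.length_take]; omega
    have hpre'len : (pvCumsum 0 (g.take (k - 1))).length = k - 1 := by
      rw [pvCumsum_length, List.length_take]; omega
    have htk : g.take k = g.take (k - 1) ++ [g[k - 1]'hklt1] := by
      have h' : k - 1 + 1 = k := by omega
      conv_lhs => rw [← h']
      rw [List.take_add_one, List.getElem?_eq_getElem (by omega), Option.toList_some]
    have h5 : ((g.take k).map (·.2)).sum
        = ((g.take (k - 1)).map (·.2)).sum + (g[k - 1]'hklt1).2 := by
      rw [htk, List.map_append, List.sum_append]; simp
    have h1 : PySem.List.pyGetD (pvCumsum 0 (g.take k) ++ g.drop k) ((k : Nat) : Int) (0, 0)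
        = g[k]'hklt := by
      rw [PySem.List.pyGetD_natCast, List.getD_eq_getElem?_getD,
        List.getElem?_append_right (by omega), hprelen, Nat.sub_self,
        List.getElem?_drop, Nat.add_zero, List.getElem?_eq_getElem hklt]
      rfl
    have h2 : PySem.List.pyGetD (pvCumsum 0 (g.take k) ++ g.drop k) ((k : Int) - 1) (0, 0)
        = ((g[k - 1]'hklt1).1, 0 + ((g.take (k - 1)).map (·.2)).sum + (g[k - 1]'hklt1).2) := by
      have hidx : (k : Int) - 1 = ((k - 1 : Nat) : Int) := by omega
      rw [hidx, PySem.List.pyGetD_natCast, List.getD_eq_getElem?_getD,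
        List.getElem?_append_left (by omega), htk, pvCumsum_append_singleton,
        List.getElem?_append_right (by omega), hpre'len, Nat.sub_self]
      rfl
    simp only [h1, h2]
    rw [PySem.List.pySetD_natCast, List.drop_eq_getElem_cons hklt, List.set_append]
    simp only [hprelen, lt_irrefl, if_false, Nat.sub_self, List.set_cons_zero]
    have h4 : pvCumsum 0 (g.take (k + 1))
        = pvCumsum 0 (g.take k) ++ [((g[k]'hklt).1, 0 + ((g.take k).map (·.2)).sum + (g[k]'hklt).2)] := by
      rw [List.take_add_one, List.getElem?_eq_getElem hklt, Option.toList_some,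
        pvCumsum_append_singleton]
    rw [h4, List.append_assoc, List.singleton_append]
    congr 2
    rw [h5]; ring_nf

theorem pvInner_eq_cumsum (g : List (Int × Int)) : pvInner g = pvCumsum 0 g := by
  unfold pvInner
  rcases g with _ | ⟨p, t⟩
  · simp [PySem.List.pyRange_one_eq_nil, pvCumsum]
  · have h := pvInner_take (p :: t) (p :: t).length (by simp) le_rfl
    simp only [PySem.List.len_eq] at h ⊢
    rw [h, List.take_length, List.drop_length, List.append_nil]

-- getD through A's phase-2 rewrite loop
theorem pv_phase2_getD (ks : List Int) (hnd : ks.Nodup) (d : PySem.Dict Int (List (Int × Int))) (c : Int) :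
    (ks.foldl (fun d l => d.insert l (pvInner (d.getD l []))) d).getD c []
      = if c ∈ ks then pvInner (d.getD c []) else d.getD c [] := by
  induction ks generalizing d with
  | nil => simp
  | cons l ks ih =>
    simp only [List.nodup_cons] at hnd
    simp only [List.foldl_cons]
    rw [ih hnd.2]
    by_cases hc : c = l
    · subst hc
      simp [hnd.1, PySem.Dict.getD_insert_self]
    · simp [hc, PySem.Dict.getD_insert_of_ne _ _ _ hc, List.mem_cons]

theorem pv_set_update_self (s : List Int) : PySem.Set.update s s = s := by
  rw [PySem.Set.update_eq_append_filter]
  have h0 : List.filter (fun y => !PySem.Set.contains s y) (PySem.Set.ofList s) = [] := by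
    rw [List.filter_eq_nil_iff]
    intro a ha
    have ha' : a ∈ s := (PySem.Set.mem_ofList s a).1 ha
    simp [ha']
  rw [h0, List.append_nil]

-- B's single pass: per-key contents are the cumulative sums seeded by the running total
theorem pv_B_getD (table : List (Int × Int)) (l : List (Int × Int))
    (bd : PySem.Dict Int (List (Int × Int))) (run : PySem.Dict Int Int) (c : Int) :
    ((l.foldl
        (fun st p =>
          let total := st.2.getD p.2 0 + pvTable table p.1
          (st.1.modify p.2 [] (fun g => g ++ [(p.1, total)]), st.2.insert p.2 total))
        (bd, run)).1).getD c []
      = bd.getD c [] ++ pvCumsum (run.getD c 0)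
          ((l.filter (fun p => p.2 == c)).map (fun p => (p.1, pvTable table p.1))) := by
  induction l generalizing bd run with
  | nil => simp [pvCumsum]
  | cons p t ih =>
    simp only [List.foldl_cons]
    rw [ih]
    by_cases hc : p.2 = c
    · simp only [hc, List.filter_cons, beq_self_eq_true, if_pos, List.map_cons]
      rw [PySem.Dict.getD_modify_self, PySem.Dict.getD_insert_self]
      simp [pvCumsum, List.append_assoc]
    · have hne : c ≠ p.2 := fun h => hc h.symm
      rw [PySem.Dict.getD_modify_of_ne _ _ _ hne, PySem.Dict.getD_insert_of_ne _ _ _ hne]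
      simp [hc]

theorem pv_keys_insert_add {ν : Type} (d : PySem.Dict Int ν) (k : Int) (v : ν) :
    (d.insert k v).keys = PySem.Set.add d.keys k := by
  rw [PySem.Set.add_eq_ite]
  by_cases h : k ∈ d.keys
  · rw [PySem.Dict.keys_insert_of_contains d v ((PySem.Dict.contains_iff_mem_keys d k).2 h)]
    simp [h]
  · rw [PySem.Dict.keys_insert_of_not_contains d v]
    · simp [h]
    · by_contra hc
      exact h ((PySem.Dict.contains_iff_mem_keys d k).1 (by revert hc; cases d.contains k <;> simp))

-- B's single pass : keys are first occurrences of the distances, in order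
theorem pv_B_keys (table : List (Int × Int)) (l : List (Int × Int))
    (bd : PySem.Dict Int (List (Int × Int))) (run : PySem.Dict Int Int) :
    ((l.foldl
        (fun st p =>
          let total := st.2.getD p.2 0 + pvTable table p.1
          (st.1.modify p.2 [] (fun g => g ++ [(p.1, total)]), st.2.insert p.2 total))
        (bd, run)).1).keys
      = PySem.Set.update bd.keys (l.map (·.2)) := by
  induction l generalizing bd run with
  | nil => simp [PySem.Set.update]
  | cons p t ih =>
    simp only [List.foldl_cons, List.map_cons]
    rw [ih, PySem.Set.update_cons]
    congr 1
    rw [PySem.Dict.keys_modify, pv_keys_insert_add]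

-- assembly
theorem Distance_et_pcc_depuis_source_spec' (dist : List (Int × Int)) (table : List (Int × Int)) :
    Distance_et_pcc_depuis_source dist table = Distance_et_pcc_depuis_source_alt dist table := by
  simp only [Distance_et_pcc_depuis_source, Distance_et_pcc_depuis_source_alt]
  set dA := dist.foldl (fun d p => d.modify p.2 [] (fun l => l ++ [(p.1, pvTable table p.1)]))
    PySem.Dict.empty with hdA
  have hkeysA : dA.keys = PySem.Set.ofList (dist.map (·.2)) :=
    PySem.Dict.keys_foldl_modify_key dist (·.2) []
      (fun _ p => fun l => l ++ [(p.1, pvTable table p.1)]) PySem.Dict.empty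
  have hndA : dA.keys.Nodup := by rw [hkeysA]; exact PySem.Set.nodup_ofList _
  have hgetA : ∀ c, dA.getD c []
      = (dist.filter (fun p => p.2 == c)).map (fun p => (p.1, pvTable table p.1)) := by
    intro c
    have h1 : dA = (dist.map (fun p => ((p.2 : Int), ((p.1 : Int), pvTable table p.1)))).foldl
        (fun d q => d.modify q.1 [] (fun l => l ++ [q.2])) PySem.Dict.empty := by
      rw [hdA]
      exact (List.foldl_map (f := fun p => ((p.2 : Int), ((p.1 : Int), pvTable table p.1)))
        (g := fun d q => d.modify q.1 [] (fun l => l ++ [q.2])) (l := dist)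
        (init := PySem.Dict.empty)).symm
    rw [h1, PySem.Dict.getD_foldl_modify_append, List.filter_map, List.map_map]
    rfl
  -- A's phase 2
  set dA2 := dA.keys.foldl (fun d l => d.insert l (pvInner (d.getD l []))) dA with hdA2
  have hkeys2 : dA2.keys = dA.keys := by
    have h := PySem.Dict.keys_foldl_insert dA.keys (fun d l => pvInner (d.getD l [])) dA
    rw [hdA2, h, pv_set_update_self]
  have hnd2 : dA2.keys.Nodup := by rw [hkeys2]; exact hndA
  rw [PySem.Dict.items_eq_map_keys dA2 hnd2 [], hkeys2]
  -- B's single pass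
  set stB := (dist.foldl
      (fun st p =>
        let total := st.2.getD p.2 0 + pvTable table p.1
        (st.1.modify p.2 [] (fun l => l ++ [(p.1, total)]), st.2.insert p.2 total))
      (PySem.Dict.empty, PySem.Dict.empty)) with hstB
  have hkeysB : stB.1.keys = PySem.Set.ofList (dist.map (·.2)) := by
    rw [hstB]; exact pv_B_keys table dist PySem.Dict.empty PySem.Dict.empty
  have hndB : stB.1.keys.Nodup := by rw [hkeysB]; exact PySem.Set.nodup_ofList _
  rw [PySem.Dict.items_eq_map_keys stB.1 hndB [], hkeysB, ← hkeysA]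
  refine List.map_congr_left (fun k hk => ?_)
  have hA := pv_phase2_getD dA.keys hndA dA k
  rw [← hdA2] at hA
  rw [hA, if_pos hk]
  have hB := pv_B_getD table dist PySem.Dict.empty PySem.Dict.empty k
  rw [← hstB] at hB
  rw [hB, pvInner_eq_cumsum, hgetA k]
  rfl

-- ===== VERDICT (by name: the statement is the Claim_ definition above) =====
theorem Distance_et_pcc_depuis_source_spec : Claim_equal_Distance_et_pcc_depuis_source := by
  intro dist table _ _
  unfold Spec_Distance_et_pcc_depuis_source
  exact Distance_et_pcc_depuis_source_spec' dist table
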